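-- pv_equiv track=rewrite | github.com/manwar/perlweeklychallenge-club | challenge-230/roger-bell-west/python/ch-1.py | separatedigits
-- ===== SOURCE A (Python) =====
-- def separatedigits(a):
--   out = []
--   for n in a:
--     m = n
--     v = []
--     while m > 0:
--       v.append(m % 10)
--       m //= 10
--     v.reverse()
--     out.extend(v)
--   return out
-- ===== SOURCE B (Python) =====
-- def separatedigits(a):
--   out = []
--   for n in a:
--     if n > 0:
--       out.extend(int(c) for c in str(n))
--   return out
-- ===== Notes on version B (the rewrite author's own statement) =====
-- stated objective: idiomatic
-- what changed: B replaces the modular-arithmetic digit loop plus reverse with a left-to-right map over the decimal string representation (int(c) for c in str(n)), guarded by n > 0 since A emits no digits for zero or negative numbers.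
import Mathlib
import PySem

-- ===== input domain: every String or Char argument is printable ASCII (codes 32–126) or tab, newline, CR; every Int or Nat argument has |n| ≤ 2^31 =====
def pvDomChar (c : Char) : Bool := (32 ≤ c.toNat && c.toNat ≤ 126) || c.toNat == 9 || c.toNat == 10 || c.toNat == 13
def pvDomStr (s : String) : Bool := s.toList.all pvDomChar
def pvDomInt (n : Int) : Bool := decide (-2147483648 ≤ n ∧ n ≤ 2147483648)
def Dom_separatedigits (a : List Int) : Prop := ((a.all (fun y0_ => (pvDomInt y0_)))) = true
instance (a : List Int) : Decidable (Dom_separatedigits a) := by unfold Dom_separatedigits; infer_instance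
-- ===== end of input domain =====

-- B maps over the decimal string representation instead of A's modular digit loop + reverse; objective: idiomatic.


-- ===== PORT A =====
-- the 'while m > 0' loop: v grows by appending m % 10, m becomes m // 10
def pyWhileA (m : Int) (v : List Int) : List Int :=
  if h : 0 < m then
    pyWhileA (PySem.Int.floordiv m 10) (v ++ [PySem.Int.mod m 10])
  else v
termination_by m.toNat
decreasing_by
  have h1 : PySem.Int.floordiv m 10 = m / 10 := Int.fdiv_eq_ediv_of_nonneg m (by norm_num)
  simp only [PySem.Int.floordiv] at *
  omega

def separatedigits (a : List Int) : List Int :=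
  a.foldl (fun out n => out ++ (pyWhileA n []).reverse) []

-- ===== PORT B =====
-- int(c) on a decimal digit character of str(n) (n > 0) is its code point minus 48; exact there.
def separatedigits_alt (a : List Int) : List Int :=
  a.foldl (fun out n =>
    if 0 < n then out ++ (PySem.Int.toChars n).map (fun c => ((c.toNat : Int) - 48))
    else out) []

-- ===== PRECONDITION & SPEC =====
def Spec_separatedigits (a : List Int) (out : List Int) : Prop := out = separatedigits_alt a
instance (a : List Int) (out : List Int) : Decidable (Spec_separatedigits a out) := by unfold Spec_separatedigits; infer_instance

-- ===== CLAIM (what is proved, stated in full; the proofs are below) =====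
def Claim_equal_separatedigits : Prop := ∀ (a : List Int), Dom_separatedigits a → Spec_separatedigits a (separatedigits a)

-- ===== LEMMAS AND PROOFS =====

-- least-significant-first digit list of a natural number
def natDigitsRev (k : Nat) : List Nat :=
  if h : k = 0 then [] else k % 10 :: natDigitsRev (k / 10)
decreasing_by exact Nat.div_lt_self (Nat.pos_of_ne_zero h) (by norm_num)

theorem pyWhileA_natCast (k : Nat) : ∀ (v : List Int),
    pyWhileA (k : Int) v = v ++ (natDigitsRev k).map Int.ofNat := by
  induction k using Nat.strong_induction_on with
  | _ k ih =>
    intro v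
    by_cases hk : k = 0
    · subst hk
      rw [pyWhileA, natDigitsRev]
      simp
    · have hkpos : 0 < k := Nat.pos_of_ne_zero hk
      rw [pyWhileA, natDigitsRev]
      have h0 : (0 : Int) < (k : Int) := by exact_mod_cast hkpos
      rw [dif_pos h0]
      have h1 : PySem.Int.floordiv (k : Int) 10 = ((k / 10 : Nat) : Int) := by
        rw [PySem.Int.floordiv, Int.fdiv_eq_ediv_of_nonneg _ (by norm_num)]
        omega
      have h2 : PySem.Int.mod (k : Int) 10 = ((k % 10 : Nat) : Int) := by
        rw [PySem.Int.mod, Int.fmod_eq_emod]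
        norm_num
      rw [h1, h2, ih (k / 10) (Nat.div_lt_self hkpos (by norm_num))]
      simp [hk]

theorem natDigitsRev_lt (k : Nat) : ∀ d ∈ natDigitsRev k, d < 10 := by
  induction k using Nat.strong_induction_on with
  | _ k ih =>
    intro d hd
    rw [natDigitsRev] at hd
    by_cases hk : k = 0
    · simp [hk] at hd
    · rw [dif_neg hk] at hd
      rcases List.mem_cons.mp hd with rfl | hd
      · omega
      · exact ih (k / 10) (Nat.div_lt_self (Nat.pos_of_ne_zero hk) (by norm_num)) d hd

theorem toDigitsCore_eq (f : Nat) : ∀ (n : Nat) (l : List Char), 0 < n → n < f →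
    Nat.toDigitsCore 10 f n l = (natDigitsRev n).reverse.map Nat.digitChar ++ l := by
  induction f with
  | zero => intro n l hn hf; omega
  | succ f ih =>
    intro n l hn hf
    rw [Nat.toDigitsCore, natDigitsRev, dif_neg (by omega)]
    by_cases h10 : n / 10 = 0
    · simp [h10, natDigitsRev]
    · rw [if_neg h10,
        ih (n / 10) (Nat.digitChar (n % 10) :: l) (Nat.pos_of_ne_zero h10)
          (by have := Nat.div_lt_self hn (by norm_num : (1:Nat) < 10); omega)]
      simp

theorem digitChar_val (d : Nat) (hd : d < 10) :
    ((Nat.digitChar d).toNat : Int) - 48 = (d : Int) := by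
  interval_cases d <;> decide

theorem rev_map_eq (dn : List Nat) (h : ∀ d ∈ dn, d < 10) :
    (dn.map Int.ofNat).reverse =
      (dn.reverse.map Nat.digitChar).map (fun c => ((c.toNat : Int) - 48)) := by
  induction dn with
  | nil => simp
  | cons d dn ih =>
    have hd : d < 10 := h d (by simp)
    have ih' := ih (fun x hx => h x (by simp [hx]))
    simp only [List.map_cons, List.reverse_cons, List.map_append, List.map_nil]
    rw [ih', digitChar_val d hd]
    simp [Int.ofNat_eq_natCast]

theorem step_eq (out : List Int) (n : Int) :
    out ++ (pyWhileA n []).reverse =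
      (if 0 < n then out ++ (PySem.Int.toChars n).map (fun c => ((c.toNat : Int) - 48))
       else out) := by
  by_cases hn : 0 < n
  · rw [if_pos hn]
    have hk : n = ((n.toNat : Nat) : Int) := by omega
    set k := n.toNat with hkdef
    have hkpos : 0 < k := by omega
    rw [hk, pyWhileA_natCast k []]
    have htc : PySem.Int.toChars ((k : Nat) : Int) = Nat.toDigits 10 k := by
      simp [PySem.Int.toChars]
    rw [htc, Nat.toDigits, toDigitsCore_eq (k + 1) k [] hkpos (by omega)]
    rw [List.nil_append, List.append_nil]
    congr 1
    exact rev_map_eq (natDigitsRev k) (natDigitsRev_lt k)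
  · rw [if_neg hn, pyWhileA, dif_neg hn]
    simp

theorem foldl_eq (a : List Int) : ∀ (out : List Int),
    a.foldl (fun out n => out ++ (pyWhileA n []).reverse) out =
    a.foldl (fun out n =>
      if 0 < n then out ++ (PySem.Int.toChars n).map (fun c => ((c.toNat : Int) - 48))
      else out) out := by
  induction a with
  | nil => intro out; rfl
  | cons n a ih =>
    intro out
    simp only [List.foldl_cons]
    rw [step_eq, ih]

-- ===== VERDICT (by name: the statement is the Claim_ definition above) =====
theorem separatedigits_spec : Claim_equal_separatedigits := by
  intro a _
  unfold Spec_separatedigits separatedigits separatedigits_alt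
  exact foldl_eq a []
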